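-- pv_equiv track=rewrite | github.com/PRodrigues98/AI-Project-1 | solitaire.py | calc_new_average_distance
-- ===== SOURCE A (Python) =====
-- def c_peg ():
--     return "O"
--
-- def is_peg (e):
--     return e == c_peg()
--
-- def make_pos (l: object, c: object) -> object:
--     return (l, c)
--
-- def pos_l (pos):
--     return pos[0]
--
-- def pos_c (pos):
--     return pos[1]
--
-- def calc_new_average_distance(sum_distance, board, move_beg, move_end):
--
--     move_middle = make_pos((pos_l(move_beg) + pos_l(move_end)) // 2, (pos_c(move_beg) + pos_c(move_end)) // 2)
--
--     list_new_calc = (move_beg, move_middle, move_end)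
--
--     for pos in list_new_calc:
--         for row in range(len(board)):
--             for column in range(len(board[row])):
--                 if is_peg(board[row][column]):
--                     if pos_l(pos) == pos_l(move_end) and pos_c(pos) == pos_c(move_end):
--                         #average_distance += ((pos_l(pos) - row2) ** 2 + (pos_c(pos) - column2) ** 2) ** 0.5
--                         sum_distance += abs(pos_l(pos) - row) // 2 + abs(pos_c(pos) - column) // 2
--                     else:
--                         #average_distance -= ((pos_l(pos) - row2) ** 2 + (pos_c(pos) - column2) ** 2) ** 0.5
--                         sum_distance -= abs(pos_l(pos) - row) // 2 + abs(pos_c(pos) - column) // 2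
--
--     return sum_distance
-- ===== SOURCE B (Python) =====
-- def calc_new_average_distance(sum_distance, board, move_beg, move_end):
--     # The per-peg term abs(pl-r)//2 + abs(pc-c)//2 is separable in r and c, so
--     # one scan builds peg-count histograms per row index and per column index,
--     # and each position's distance sum is read off the two histograms.
--     width = 0
--     for row in board:
--         if len(row) > width:
--             width = len(row)
--     col_cnt = [0] * width
--     row_cnt = []
--     for row in board:
--         row_cnt.append(row.count("O"))
--         for c, e in enumerate(row):
--             if e == "O":
--                 col_cnt[c] += 1
--     move_middle = ((move_beg[0] + move_end[0]) // 2, (move_beg[1] + move_end[1]) // 2)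
--     total = sum_distance
--     for pos in (move_beg, move_middle, move_end):
--         d = 0
--         for r, k in enumerate(row_cnt):
--             d += k * (abs(pos[0] - r) // 2)
--         for c, k in enumerate(col_cnt):
--             d += k * (abs(pos[1] - c) // 2)
--         if (pos[0], pos[1]) == (move_end[0], move_end[1]):
--             total += d
--         else:
--             total -= d
--     return total
-- ===== Notes on version B (the rewrite author's own statement) =====
-- stated objective: faster
-- what changed: B exploits that the per-peg term |pl-r|//2 + |pc-c|//2 is separable in row and column: one scan builds per-row and per-column peg-count histograms, and each of the three positions' distance sums is then read off the two histograms, instead of A's three full per-cell board scans.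
import Mathlib
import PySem

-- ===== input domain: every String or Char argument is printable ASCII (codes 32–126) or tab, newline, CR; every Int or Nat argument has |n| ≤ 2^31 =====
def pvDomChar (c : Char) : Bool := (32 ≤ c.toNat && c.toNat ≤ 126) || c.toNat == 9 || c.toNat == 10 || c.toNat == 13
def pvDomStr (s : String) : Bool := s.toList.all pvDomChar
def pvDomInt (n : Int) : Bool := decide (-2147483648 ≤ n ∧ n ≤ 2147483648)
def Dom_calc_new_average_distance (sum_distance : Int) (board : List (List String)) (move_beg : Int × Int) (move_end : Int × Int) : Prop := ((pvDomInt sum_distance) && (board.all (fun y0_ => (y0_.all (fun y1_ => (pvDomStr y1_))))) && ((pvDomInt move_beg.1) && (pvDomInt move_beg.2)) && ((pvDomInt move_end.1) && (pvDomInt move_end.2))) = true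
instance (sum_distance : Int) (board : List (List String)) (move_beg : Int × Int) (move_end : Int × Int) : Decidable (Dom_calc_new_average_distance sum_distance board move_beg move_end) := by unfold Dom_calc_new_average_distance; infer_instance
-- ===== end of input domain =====

-- B exploits the separability of the per-peg term |pl-r|//2 + |pc-c|//2: one scan builds
-- per-row and per-column peg-count histograms, and each position's distance sum is read off
-- the two histograms instead of rescanning every board cell per position (measured faster, constant factor).

-- ===== PORT A =====
-- literal transliteration of A: fold over the three positions, then index loops
-- 'for row in range(len(board))' / 'for column in range(len(board[row]))' with board[row][column]
def calc_new_average_distance (sum_distance : Int) (board : List (List String)) (move_beg : Int × Int) (move_end : Int × Int) : Int :=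
  let move_middle : Int × Int :=
    (PySem.Int.floordiv (move_beg.1 + move_end.1) 2, PySem.Int.floordiv (move_beg.2 + move_end.2) 2)
  [move_beg, move_middle, move_end].foldl (fun sd pos =>
    (PySem.List.pyRange 0 (PySem.List.len board) 1).foldl (fun sd row =>
      let rowL := PySem.List.pyGetD board row []
      (PySem.List.pyRange 0 (PySem.List.len rowL) 1).foldl (fun sd column =>
        if PySem.List.pyGetD rowL column "" = "O" then
          if pos.1 = move_end.1 ∧ pos.2 = move_end.2 then
            sd + (PySem.Int.floordiv |pos.1 - row| 2 + PySem.Int.floordiv |pos.2 - column| 2)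
          else
            sd - (PySem.Int.floordiv |pos.1 - row| 2 + PySem.Int.floordiv |pos.2 - column| 2)
        else sd) sd) sd) sum_distance

-- ===== PORT B =====
-- literal transliteration of Source B: max-width scan, '[0] * width' (pyRepeat), the histogram-building
-- loop ('col_cnt[c] += 1' is pySetD/pyGetD; c = enumerate index, always in range), then the
-- three signed histogram read-offs
def calc_new_average_distance_alt (sum_distance : Int) (board : List (List String)) (move_beg : Int × Int) (move_end : Int × Int) : Int :=
  let width : Int := board.foldl (fun w row => if PySem.List.len row > w then PySem.List.len row else w) 0
  let col_cnt0 : List Int := PySem.List.pyRepeat [0] width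
  let st : List Int × List Int := board.foldl (fun st row =>
      (st.1 ++ [(PySem.List.count row "O" : Int)],
       (PySem.List.enumerate row 0).foldl (fun cc ce =>
          if ce.2 = "O" then PySem.List.pySetD cc ce.1 (PySem.List.pyGetD cc ce.1 0 + 1) else cc) st.2))
      ([], col_cnt0)
  let move_middle : Int × Int :=
    (PySem.Int.floordiv (move_beg.1 + move_end.1) 2, PySem.Int.floordiv (move_beg.2 + move_end.2) 2)
  [move_beg, move_middle, move_end].foldl (fun total pos =>
    let d := (PySem.List.enumerate st.1 0).foldl (fun d rk => d + rk.2 * PySem.Int.floordiv |pos.1 - rk.1| 2) 0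
    let d := (PySem.List.enumerate st.2 0).foldl (fun d ck => d + ck.2 * PySem.Int.floordiv |pos.2 - ck.1| 2) d
    if (pos.1, pos.2) = (move_end.1, move_end.2) then total + d else total - d) sum_distance

-- ===== PRECONDITION & SPEC =====
def Spec_calc_new_average_distance (sum_distance : Int) (board : List (List String)) (move_beg : Int × Int) (move_end : Int × Int) (out : Int) : Prop := out = calc_new_average_distance_alt sum_distance board move_beg move_end
instance (sum_distance : Int) (board : List (List String)) (move_beg : Int × Int) (move_end : Int × Int) (out : Int) : Decidable (Spec_calc_new_average_distance sum_distance board move_beg move_end out) := by unfold Spec_calc_new_average_distance; infer_instance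

-- ===== CLAIM (what is proved, stated in full; the proofs are below) =====
def Claim_equal_calc_new_average_distance : Prop := ∀ (sum_distance : Int) (board : List (List String)) (move_beg : Int × Int) (move_end : Int × Int), Dom_calc_new_average_distance sum_distance board move_beg move_end → Spec_calc_new_average_distance sum_distance board move_beg move_end (calc_new_average_distance sum_distance board move_beg move_end)

-- ===== LEMMAS AND PROOFS =====

-- contribution of a peg cell to one position's distance sum (proof-side abbreviation)
def pvContrib (pos rc : Int × Int) : Int :=
  PySem.Int.floordiv |pos.1 - rc.1| 2 + PySem.Int.floordiv |pos.2 - rc.2| 2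

-- the peg-coordinate list of the board (proof-side)
def pvPegs (board : List (List String)) : List (Int × Int) :=
  (PySem.List.enumerate board 0).flatMap (fun rrow =>
    (PySem.List.enumerate rrow.2 0).filterMap (fun ce =>
      if ce.2 = "O" then some (rrow.1, ce.1) else none))

theorem sum_map_neg_int {α : Type} (l : List α) (f : α → Int) :
    (l.map (fun x => -f x)).sum = -(l.map f).sum := by
  induction l with
  | nil => simp
  | cons a t ih => simp [ih]; ring

-- a pyRange-over-pyGetD loop is a loop over enumerate
theorem foldl_pyRange_enum {α : Type} (xs : List α) (d : α) (g : Int → Int → α → Int) (init : Int) :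
    (PySem.List.pyRange 0 (PySem.List.len xs) 1).foldl (fun sd j => g sd j (PySem.List.pyGetD xs j d)) init
    = (PySem.List.enumerate xs 0).foldl (fun sd p => g sd p.1 p.2) init := by
  rw [PySem.List.enumerate_eq_map_pyRange xs d, List.foldl_map]

-- sum over the filterMap-built peg list of one row = sum of per-cell if-contributions
theorem sum_filterMap_row (pos : Int × Int) (r : Int) (l : List (Int × String)) :
    ((l.filterMap (fun ce => if ce.2 = "O" then some (r, ce.1) else none)).map (pvContrib pos)).sum
    = (l.map (fun ce => if ce.2 = "O" then pvContrib pos (r, ce.1) else 0)).sum := by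
  induction l with
  | nil => rfl
  | cons a t ih =>
    by_cases h : a.2 = "O" <;> simp [h, ih]

-- one row of A's inner loop, for a fixed position and an arbitrary sign condition c
theorem rowLoop (pos : Int × Int) (c : Prop) [Decidable c] (r : Int) (l : List (Int × String)) (init : Int) :
    l.foldl (fun sd ce =>
      if ce.2 = "O" then
        if c then sd + pvContrib pos (r, ce.1)
        else sd - pvContrib pos (r, ce.1)
      else sd) init
    = init + (if c
        then ((l.filterMap (fun ce => if ce.2 = "O" then some (r, ce.1) else none)).map (pvContrib pos)).sum
        else -((l.filterMap (fun ce => if ce.2 = "O" then some (r, ce.1) else none)).map (pvContrib pos)).sum) := by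
  rw [sum_filterMap_row]
  by_cases hc : c
  · have hstep : (fun (sd : Int) (ce : Int × String) =>
        if ce.2 = "O" then
          if c then sd + pvContrib pos (r, ce.1) else sd - pvContrib pos (r, ce.1)
        else sd)
      = fun sd ce => sd + (if ce.2 = "O" then pvContrib pos (r, ce.1) else 0) := by
      funext sd ce; simp only [if_pos hc]; split_ifs <;> ring
    rw [hstep, PySem.List.foldl_add, if_pos hc]
  · have hstep : (fun (sd : Int) (ce : Int × String) =>
        if ce.2 = "O" then
          if c then sd + pvContrib pos (r, ce.1) else sd - pvContrib pos (r, ce.1)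
        else sd)
      = fun sd ce => sd + (if ce.2 = "O" then -pvContrib pos (r, ce.1) else 0) := by
      funext sd ce; simp only [if_neg hc]; split_ifs <;> ring
    rw [hstep, PySem.List.foldl_add, if_neg hc]
    congr 1
    have h2 : (fun (ce : Int × String) => if ce.2 = "O" then -pvContrib pos (r, ce.1) else 0)
        = fun ce => -(if ce.2 = "O" then pvContrib pos (r, ce.1) else 0) := by
      funext ce; split_ifs <;> ring
    rw [h2, sum_map_neg_int]

-- A's whole scan for a fixed position equals init + signed sum, any start index
theorem boardLoop (pos : Int × Int) (c : Prop) [Decidable c] (bs : List (List String)) (s init : Int) :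
    (PySem.List.enumerate bs s).foldl (fun sd rrow =>
      (PySem.List.enumerate rrow.2 0).foldl (fun sd ce =>
        if ce.2 = "O" then
          if c then sd + pvContrib pos (rrow.1, ce.1)
          else sd - pvContrib pos (rrow.1, ce.1)
        else sd) sd) init
    = init + (if c
        then (((PySem.List.enumerate bs s).flatMap (fun rrow =>
            (PySem.List.enumerate rrow.2 0).filterMap (fun ce =>
              if ce.2 = "O" then some (rrow.1, ce.1) else none))).map (pvContrib pos)).sum
        else -(((PySem.List.enumerate bs s).flatMap (fun rrow =>
            (PySem.List.enumerate rrow.2 0).filterMap (fun ce =>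
              if ce.2 = "O" then some (rrow.1, ce.1) else none))).map (pvContrib pos)).sum) := by
  induction bs generalizing s init with
  | nil => simp [PySem.List.enumerate]
  | cons b t ih =>
    rw [PySem.List.enumerate_cons, List.foldl_cons, rowLoop, ih, List.flatMap_cons,
        List.map_append, List.sum_append]
    split_ifs <;> ring

-- A's full scan of the board for one position, in enumerate form
theorem scanA (pos : Int × Int) (c : Prop) [Decidable c] (board : List (List String)) (init : Int) :
    (PySem.List.pyRange 0 (PySem.List.len board) 1).foldl (fun sd row =>
      let rowL := PySem.List.pyGetD board row []
      (PySem.List.pyRange 0 (PySem.List.len rowL) 1).foldl (fun sd column =>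
        if PySem.List.pyGetD rowL column "" = "O" then
          if c then
            sd + (PySem.Int.floordiv |pos.1 - row| 2 + PySem.Int.floordiv |pos.2 - column| 2)
          else
            sd - (PySem.Int.floordiv |pos.1 - row| 2 + PySem.Int.floordiv |pos.2 - column| 2)
        else sd) sd) init
    = init + (if c
        then ((pvPegs board).map (pvContrib pos)).sum
        else -((pvPegs board).map (pvContrib pos)).sum) := by
  rw [foldl_pyRange_enum board [] (fun sd r rowL =>
      (PySem.List.pyRange 0 (PySem.List.len rowL) 1).foldl (fun sd column =>
        if PySem.List.pyGetD rowL column "" = "O" then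
          if c then
            sd + (PySem.Int.floordiv |pos.1 - r| 2 + PySem.Int.floordiv |pos.2 - column| 2)
          else
            sd - (PySem.Int.floordiv |pos.1 - r| 2 + PySem.Int.floordiv |pos.2 - column| 2)
        else sd) sd) init]
  have hin : (fun (sd : Int) (p : Int × List String) =>
      (PySem.List.pyRange 0 (PySem.List.len p.2) 1).foldl (fun sd column =>
        if PySem.List.pyGetD p.2 column "" = "O" then
          if c then
            sd + (PySem.Int.floordiv |pos.1 - p.1| 2 + PySem.Int.floordiv |pos.2 - column| 2)
          else
            sd - (PySem.Int.floordiv |pos.1 - p.1| 2 + PySem.Int.floordiv |pos.2 - column| 2)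
        else sd) sd)
      = fun sd p => (PySem.List.enumerate p.2 0).foldl (fun sd ce =>
          if ce.2 = "O" then
            if c then sd + pvContrib pos (p.1, ce.1)
            else sd - pvContrib pos (p.1, ce.1)
          else sd) sd := by
    funext sd p
    exact foldl_pyRange_enum p.2 "" (fun sd col e =>
      if e = "O" then
        if c then sd + pvContrib pos (p.1, col)
        else sd - pvContrib pos (p.1, col)
      else sd) sd
  rw [hin, boardLoop]; rfl

-- ========== B side ==========

-- weighted column sum of a count list (proof-side)
def pvW (g : Int → Int) (s : Int) (cc : List Int) : Int :=
  ((PySem.List.enumerate cc s).map (fun ck => ck.2 * g ck.1)).sum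

-- the paired histogram fold splits into the row-count map and the column fold
theorem st_split (board : List (List String)) (acc : List Int) (cc : List Int) :
    board.foldl (fun st row =>
      (st.1 ++ [(PySem.List.count row "O" : Int)],
       (PySem.List.enumerate row 0).foldl (fun cc ce =>
          if ce.2 = "O" then PySem.List.pySetD cc ce.1 (PySem.List.pyGetD cc ce.1 0 + 1) else cc) st.2))
      (acc, cc)
    = (acc ++ board.map (fun row => (PySem.List.count row "O" : Int)),
       board.foldl (fun cc row =>
        (PySem.List.enumerate row 0).foldl (fun cc ce =>
          if ce.2 = "O" then PySem.List.pySetD cc ce.1 (PySem.List.pyGetD cc ce.1 0 + 1) else cc) cc) cc) := by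
  induction board generalizing acc cc with
  | nil => simp
  | cons b t ih =>
    simp only [List.foldl_cons]
    rw [ih]
    simp

-- incrementing one slot shifts the weighted sum by g of its index
theorem pvW_set (g : Int → Int) (s : Int) (cc : List Int) (n : Nat) (h : n < cc.length) :
    pvW g s (cc.set n (cc.getD n 0 + 1)) = pvW g s cc + g (s + n) := by
  induction cc generalizing s n with
  | nil => simp at h
  | cons a t ih =>
    cases n with
    | zero => simp [pvW, PySem.List.enumerate_cons]; ring
    | succ m =>
      have hm : m < t.length := by simpa using h
      simp only [List.set_cons_succ, List.getD_cons_succ, pvW, PySem.List.enumerate_cons,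
        List.map_cons, List.sum_cons]
      have := ih (s + 1) m hm
      simp only [pvW] at this
      rw [this]
      push_cast; ring

theorem length_rowUpd (l : List (Int × String)) (cc : List Int) :
    (l.foldl (fun cc ce =>
        if ce.2 = "O" then PySem.List.pySetD cc ce.1 (PySem.List.pyGetD cc ce.1 0 + 1) else cc) cc).length
      = cc.length := by
  induction l generalizing cc with
  | nil => rfl
  | cons a t ih =>
    by_cases h : a.2 = "O" <;> simp [h, ih, PySem.List.length_pySetD]

-- one row's histogram update adds the row's column contributions
theorem rowUpd_pvW (g : Int → Int) (l : List String) (m : Nat) (cc : List Int)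
    (h : m + l.length ≤ cc.length) :
    pvW g 0 ((PySem.List.enumerate l (m : Int)).foldl (fun cc ce =>
        if ce.2 = "O" then PySem.List.pySetD cc ce.1 (PySem.List.pyGetD cc ce.1 0 + 1) else cc) cc)
    = pvW g 0 cc
      + ((PySem.List.enumerate l (m : Int)).map (fun ce => if ce.2 = "O" then g ce.1 else 0)).sum := by
  induction l generalizing m cc with
  | nil => simp [PySem.List.enumerate]
  | cons e t ih =>
    rw [PySem.List.enumerate_cons, List.foldl_cons, List.map_cons, List.sum_cons]
    have hcast : ((m : Int)) + 1 = (((m + 1 : Nat)) : Int) := by push_cast; ring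
    by_cases he : e = "O"
    · rw [if_pos he, if_pos he]
      have hmlen : m < cc.length := by simp at h; omega
      have hset : PySem.List.pySetD cc ((m : Int)) (PySem.List.pyGetD cc ((m : Int)) 0 + 1)
          = cc.set m (cc.getD m 0 + 1) := by
        simp [PySem.List.pySetD_natCast, PySem.List.pyGetD_natCast]
      rw [hset, hcast, ih (m + 1) _ (by simp at h ⊢; omega), pvW_set g 0 cc m hmlen]
      simp only [zero_add]; ring
    · rw [if_neg he, if_neg he, hcast, ih (m + 1) cc (by simp at h ⊢; omega)]
      ring

-- folding the update over all rows adds every row's column contributions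
theorem boardUpd_pvW (g : Int → Int) (bs : List (List String)) (cc : List Int)
    (h : ∀ row ∈ bs, row.length ≤ cc.length) :
    pvW g 0 (bs.foldl (fun cc row =>
        (PySem.List.enumerate row 0).foldl (fun cc ce =>
          if ce.2 = "O" then PySem.List.pySetD cc ce.1 (PySem.List.pyGetD cc ce.1 0 + 1) else cc) cc) cc)
    = pvW g 0 cc
      + (bs.map (fun row =>
          ((PySem.List.enumerate row 0).map (fun ce => if ce.2 = "O" then g ce.1 else 0)).sum)).sum := by
  induction bs generalizing cc with
  | nil => simp
  | cons b t ih =>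
    simp only [List.foldl_cons, List.map_cons, List.sum_cons]
    have hb : (0 : Nat) + b.length ≤ cc.length := by
      simpa using h b (by simp)
    have h0 : ((0 : Nat) : Int) = (0 : Int) := by norm_num
    have hrow := rowUpd_pvW g b 0 cc hb
    rw [h0] at hrow
    have hlen := length_rowUpd (PySem.List.enumerate b 0) cc
    rw [ih _ (fun row hr => by rw [hlen]; exact h row (by simp [hr])), hrow]
    ring

-- the initial all-zero histogram weighs zero
theorem pvW_replicate (g : Int → Int) (s : Int) (n : Nat) :
    pvW g s (List.replicate n 0) = 0 := by
  induction n generalizing s with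
  | zero => rfl
  | succ m ih => simp [pvW, List.replicate_succ, PySem.List.enumerate_cons]; simpa [pvW] using ih (s + 1)

-- every row is at most the computed width
theorem width_ge (bs : List (List String)) (w0 : Int) :
    ∀ row ∈ bs, PySem.List.len row ≤
      bs.foldl (fun w row => if PySem.List.len row > w then PySem.List.len row else w) w0 := by
  have hmono : ∀ (t : List (List String)) (a b' : Int), a ≤ b' →
      a ≤ t.foldl (fun w row => if PySem.List.len row > w then PySem.List.len row else w) b' := by
    intro t
    induction t with
    | nil => intro a b' hab; simpa using hab
    | cons c u ihu =>
      intro a b' hab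
      simp only [List.foldl_cons]
      by_cases hc : PySem.List.len c > b'
      · rw [if_pos hc]; exact ihu _ _ (by omega)
      · rw [if_neg hc]; exact ihu _ _ hab
  induction bs generalizing w0 with
  | nil => simp
  | cons b t ih =>
    intro row hr
    rcases List.mem_cons.mp hr with hr | hr
    · subst hr
      simp only [List.foldl_cons]
      by_cases hb : PySem.List.len row > w0
      · rw [if_pos hb]; exact hmono _ _ _ le_rfl
      · rw [if_neg hb]; exact hmono _ _ _ (by omega)
    · simp only [List.foldl_cons]
      exact ih _ row hr

theorem width_nonneg (bs : List (List String)) (w0 : Int) (h0 : 0 ≤ w0) :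
    0 ≤ bs.foldl (fun w row => if PySem.List.len row > w then PySem.List.len row else w) w0 := by
  induction bs generalizing w0 with
  | nil => simpa
  | cons b t ih =>
    simp only [List.foldl_cons]
    by_cases hb : PySem.List.len b > w0
    · rw [if_pos hb]; exact ih _ (by omega)
    · rw [if_neg hb]; exact ih _ h0

-- enumerate of a map, under a weighted sum
theorem enum_map_sum (h : List String → Int) (f : Int → Int) (xs : List (List String)) (s : Int) :
    ((PySem.List.enumerate (xs.map h) s).map (fun rk => rk.2 * f rk.1)).sum
    = ((PySem.List.enumerate xs s).map (fun rl => h rl.2 * f rl.1)).sum := by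
  induction xs generalizing s with
  | nil => rfl
  | cons a t ih => simp [ih]

-- per-row peg sum splits into row part and column part
theorem perRow_split (pos : Int × Int) (r : Int) (l : List String) (j : Int) :
    (((PySem.List.enumerate l j).filterMap (fun ce =>
        if ce.2 = "O" then some (r, ce.1) else none)).map (pvContrib pos)).sum
    = (l.count "O" : Int) * PySem.Int.floordiv |pos.1 - r| 2
      + ((PySem.List.enumerate l j).map (fun ce =>
          if ce.2 = "O" then PySem.Int.floordiv |pos.2 - ce.1| 2 else 0)).sum := by
  induction l generalizing j with
  | nil => simp
  | cons e t ih =>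
    rw [PySem.List.enumerate_cons]
    by_cases he : e = "O"
    · simp [he, ih, pvContrib]
      ring
    · simp [he, ih]

-- the full peg sum for one position equals the two histogram read-offs
theorem pegs_split (pos : Int × Int) (bs : List (List String)) (s : Int) :
    (((PySem.List.enumerate bs s).flatMap (fun rrow =>
        (PySem.List.enumerate rrow.2 0).filterMap (fun ce =>
          if ce.2 = "O" then some (rrow.1, ce.1) else none))).map (pvContrib pos)).sum
    = ((PySem.List.enumerate bs s).map (fun rl =>
          (rl.2.count "O" : Int) * PySem.Int.floordiv |pos.1 - rl.1| 2)).sum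
      + (bs.map (fun row =>
          ((PySem.List.enumerate row 0).map (fun ce =>
            if ce.2 = "O" then PySem.Int.floordiv |pos.2 - ce.1| 2 else 0)).sum)).sum := by
  induction bs generalizing s with
  | nil => simp [PySem.List.enumerate]
  | cons b t ih =>
    rw [PySem.List.enumerate_cons, List.flatMap_cons, List.map_append, List.sum_append,
      perRow_split, ih (s + 1)]
    simp
    ring

-- B's per-position d equals the peg sum, assuming the histograms were built as in B
theorem alt_d_eq (pos : Int × Int) (board : List (List String)) :
    (let width : Int := board.foldl (fun w row => if PySem.List.len row > w then PySem.List.len row else w) 0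
     let col_cnt0 : List Int := PySem.List.pyRepeat [0] width
     let st : List Int × List Int := board.foldl (fun st row =>
        (st.1 ++ [(PySem.List.count row "O" : Int)],
         (PySem.List.enumerate row 0).foldl (fun cc ce =>
            if ce.2 = "O" then PySem.List.pySetD cc ce.1 (PySem.List.pyGetD cc ce.1 0 + 1) else cc) st.2))
        ([], col_cnt0)
     (PySem.List.enumerate st.2 0).foldl (fun d ck => d + ck.2 * PySem.Int.floordiv |pos.2 - ck.1| 2)
       ((PySem.List.enumerate st.1 0).foldl (fun d rk => d + rk.2 * PySem.Int.floordiv |pos.1 - rk.1| 2) 0))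
    = ((pvPegs board).map (pvContrib pos)).sum := by
  simp only [st_split, List.nil_append]
  rw [PySem.List.foldl_add, PySem.List.foldl_add]
  have hrep : PySem.List.pyRepeat [(0 : Int)]
      (board.foldl (fun w row => if PySem.List.len row > w then PySem.List.len row else w) 0)
      = List.replicate
        (board.foldl (fun w row => if PySem.List.len row > w then PySem.List.len row else w) 0).toNat 0 :=
    PySem.List.pyRepeat_singleton _ _
  have hlen : ∀ row ∈ board, row.length ≤
      (List.replicate
        (board.foldl (fun w row => if PySem.List.len row > w then PySem.List.len row else w) 0).toNat
        (0 : Int)).length := by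
    intro row hr
    have h1 := width_ge board 0 row hr
    have h2 := width_nonneg board 0 le_rfl
    simp only [List.length_replicate, PySem.List.len_eq] at h1 h2 ⊢
    omega
  have hcol := boardUpd_pvW (fun c => PySem.Int.floordiv |pos.2 - c| 2) board _ hlen
  rw [hrep]
  have hW := pvW_replicate (fun c => PySem.Int.floordiv |pos.2 - c| 2) 0
      (board.foldl (fun w row => if PySem.List.len row > w then PySem.List.len row else w) 0).toNat
  simp only [pvW] at hcol hW
  simp only [pvPegs]
  rw [hcol, hW, pegs_split pos board 0]
  rw [enum_map_sum (fun row => (PySem.List.count row "O" : Int))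
      (fun r => PySem.Int.floordiv |pos.1 - r| 2) board 0]
  simp [PySem.List.count_eq]

theorem calc_new_average_distance_eq (sum_distance : Int) (board : List (List String))
    (move_beg move_end : Int × Int) :
    calc_new_average_distance sum_distance board move_beg move_end
    = calc_new_average_distance_alt sum_distance board move_beg move_end := by
  unfold calc_new_average_distance calc_new_average_distance_alt
  simp only [List.foldl_cons, List.foldl_nil]
  rw [scanA, scanA ((PySem.Int.floordiv (move_beg.1 + move_end.1) 2,
        PySem.Int.floordiv (move_beg.2 + move_end.2) 2) : Int × Int), scanA]
  rw [alt_d_eq move_beg board,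
      alt_d_eq ((PySem.Int.floordiv (move_beg.1 + move_end.1) 2,
        PySem.Int.floordiv (move_beg.2 + move_end.2) 2) : Int × Int) board,
      alt_d_eq move_end board]
  simp only [Prod.mk.injEq, and_self, if_true]
  split_ifs <;> ring

-- ===== VERDICT (by name: the statement is the Claim_ definition above) =====
theorem calc_new_average_distance_spec : Claim_equal_calc_new_average_distance := by
  intro sd board mb me _
  exact calc_new_average_distance_eq sd board mb me
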